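-- pv_equiv track=rewrite | github.com/uptycslabs/juno-mcp-server | src/tools.py | _fmt_task_progress
-- ===== SOURCE A (Python) =====
-- def _fmt_task_progress(data: dict) -> str:
--     """Format a compact progress line for timeout responses.
--
--     Only shows the count and currently running task — avoids
--     repeating the full task list on every poll.
--     """
--     tasks = data.get("tasks", [])
--     completed = sum(1 for t in tasks if t.get("status") == "completed")
--     total = len(tasks)
--     running = next(
--         (t.get("title", "") for t in tasks if t.get("status") == "running"),
--         "",
--     )
--     if running:
--         return f"Progress: {completed}/{total} tasks done — now running: {running}"
--     return f"Progress: {completed}/{total} tasks done"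
-- ===== SOURCE B (Python) =====
-- def _fmt_task_progress(data: dict) -> str:
--     """Single pass over tasks: count completed and capture the first running title."""
--     tasks = data.get("tasks", [])
--     completed = 0
--     running = ""
--     seen = False
--     for t in tasks:
--         s = t.get("status")
--         if s == "completed":
--             completed += 1
--         elif s == "running" and not seen:
--             seen = True
--             running = t.get("title", "")
--     total = len(tasks)
--     if running:
--         return f"Progress: {completed}/{total} tasks done — now running: {running}"
--     return f"Progress: {completed}/{total} tasks done"
-- ===== Notes on version B (the rewrite author's own statement) =====
-- stated objective: alternative
-- what changed: Replaces A's two separate passes over tasks (a sum comprehension plus a next() generator scan) with one explicit loop maintaining a completed counter and the first running title guarded by a seen flag.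
import Mathlib
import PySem

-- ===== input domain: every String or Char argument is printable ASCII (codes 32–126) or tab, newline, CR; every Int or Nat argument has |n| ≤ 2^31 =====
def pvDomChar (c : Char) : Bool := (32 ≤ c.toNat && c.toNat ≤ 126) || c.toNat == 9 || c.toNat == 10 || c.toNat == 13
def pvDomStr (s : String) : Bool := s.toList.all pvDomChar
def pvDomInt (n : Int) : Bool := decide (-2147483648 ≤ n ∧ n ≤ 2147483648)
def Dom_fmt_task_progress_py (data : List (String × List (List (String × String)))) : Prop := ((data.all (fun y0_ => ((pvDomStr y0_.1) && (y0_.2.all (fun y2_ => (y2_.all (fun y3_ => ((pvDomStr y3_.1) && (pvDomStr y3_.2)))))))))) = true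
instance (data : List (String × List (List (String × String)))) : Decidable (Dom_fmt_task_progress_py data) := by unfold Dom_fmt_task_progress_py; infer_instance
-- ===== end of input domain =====

-- ===== PORT A =====
-- B makes one pass where A makes two; return values proved equal on all inputs (neither mutates).

-- t.get(k) : first-match association lookup, None -> none
def pvGet? (t : List (String × String)) (k : String) : Option String :=
  (t.find? (fun p => p.1 == k)).map Prod.snd

-- t.get(k, dflt)
def pvGetD (t : List (String × String)) (k dflt : String) : String :=
  match pvGet? t k with
  | some v => v
  | none => dflt

def fmt_task_progress_py (data : List (String × List (List (String × String)))) : String :=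
  let tasks := match (data.find? (fun p => p.1 == "tasks")).map Prod.snd with
    | some ts => ts
    | none => []
  let completed : Int := tasks.foldl (fun acc t => if pvGet? t "status" == some "completed" then acc + 1 else acc) 0
  let total : Int := (tasks.length : Int)
  let running : String := match tasks.find? (fun t => pvGet? t "status" == some "running") with
    | some t => pvGetD t "title" ""
    | none => ""
  if running ≠ "" then
    "Progress: " ++ PySem.Int.toStr completed ++ "/" ++ PySem.Int.toStr total ++ " tasks done — now running: " ++ running
  else
    "Progress: " ++ PySem.Int.toStr completed ++ "/" ++ PySem.Int.toStr total ++ " tasks done"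

-- ===== PORT B =====
-- one loop step: state = (completed, running, seen)
def bStep (st : Int × String × Bool) (t : List (String × String)) : Int × String × Bool :=
  let s := pvGet? t "status"
  if s == some "completed" then (st.1 + 1, st.2.1, st.2.2)
  else if s == some "running" && !st.2.2 then (st.1, pvGetD t "title" "", true)
  else st

def fmt_task_progress_py_alt (data : List (String × List (List (String × String)))) : String :=
  let tasks := match (data.find? (fun p => p.1 == "tasks")).map Prod.snd with
    | some ts => ts
    | none => []
  let st := tasks.foldl bStep (0, "", false)
  let completed := st.1
  let running := st.2.1
  let total : Int := (tasks.length : Int)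
  if running ≠ "" then
    "Progress: " ++ PySem.Int.toStr completed ++ "/" ++ PySem.Int.toStr total ++ " tasks done — now running: " ++ running
  else
    "Progress: " ++ PySem.Int.toStr completed ++ "/" ++ PySem.Int.toStr total ++ " tasks done"

-- ===== PRECONDITION & SPEC =====
def Spec_fmt_task_progress_py (data : List (String × List (List (String × String)))) (out : String) : Prop := out = fmt_task_progress_py_alt data
instance (data : List (String × List (List (String × String)))) (out : String) : Decidable (Spec_fmt_task_progress_py data out) := by unfold Spec_fmt_task_progress_py; infer_instance

-- ===== CLAIM (what is proved, stated in full; the proofs are below) =====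
def Claim_equal_fmt_task_progress_py : Prop := ∀ (data : List (String × List (List (String × String)))), Dom_fmt_task_progress_py data → Spec_fmt_task_progress_py data (fmt_task_progress_py data)

-- ===== LEMMAS AND PROOFS =====

-- B's single fold computes A's two passes: first component is A's completed count,
-- second is r overwritten by the first running title when seen is still false.
theorem bStep_fold (ts : List (List (String × String))) :
    ∀ (c : Int) (r : String) (seen : Bool),
    ts.foldl bStep (c, r, seen) =
      (ts.foldl (fun acc t => if pvGet? t "status" == some "completed" then acc + 1 else acc) c,
       (if seen then r else
         match ts.find? (fun t => pvGet? t "status" == some "running") with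
         | some t => pvGetD t "title" ""
         | none => r),
       seen || ts.any (fun t => pvGet? t "status" == some "running")) := by
  induction ts with
  | nil => intro c r seen; cases seen <;> simp
  | cons t ts ih =>
    intro c r seen
    simp only [List.foldl_cons, List.find?_cons, List.any_cons, bStep]
    by_cases hc : pvGet? t "status" == some "completed"
    · have hr : (pvGet? t "status" == some "running") = false := by
        have := eq_of_beq hc
        simp [this]
      simp [hc, hr, ih]
    · simp only [hc]
      by_cases hrun : pvGet? t "status" == some "running"
      · cases seen with
        | false => simp [hrun, ih]
        | true => simp [hrun, ih]
      · simp [hrun, ih]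

-- ===== VERDICT (by name: the statement is the Claim_ definition above) =====
theorem fmt_task_progress_py_spec : Claim_equal_fmt_task_progress_py := by
  intro data _
  show fmt_task_progress_py data = fmt_task_progress_py_alt data
  unfold fmt_task_progress_py fmt_task_progress_py_alt
  simp only [bStep_fold]
  rfl
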